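-- pv_equiv track=rewrite | github.com/iheartwifi/CR432eDevoir1 | CR432eHomework2.py | frq_cpr
-- ===== SOURCE A (Python) =====
-- def frq_cpr(byte_sequence):
--     # Create a dictionary to count occurrences of each byte
--     count = {}
--
--     # Count occurrences of each byte
--     for byte in byte_sequence:
--         if byte in count:
--             count[byte] += 1
--         else:
--             count[byte] = 1
--
--     # Sort the dictionary by count in descending order
--     sorted_count = sorted(count.items(), key=lambda x: x[1], reverse=True)
--
--     return sorted_count
-- ===== SOURCE B (Python) =====
-- def frq_cpr(byte_sequence):
--     # one-pass count, then bucket (counting) sort by frequency instead of a comparison sort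
--     count = {}
--     for byte in byte_sequence:
--         count[byte] = count.get(byte, 0) + 1
--
--     # buckets keyed by frequency, filled in first-appearance order
--     buckets = {}
--     for pair in count.items():
--         if pair[1] in buckets:
--             buckets[pair[1]].append(pair)
--         else:
--             buckets[pair[1]] = [pair]
--
--     # walk frequencies from the maximum down to 1, concatenating the buckets
--     result = []
--     if buckets:
--         for c in range(max(buckets), 0, -1):
--             if c in buckets:
--                 result += buckets[c]
--     return result
-- ===== Notes on version B (the rewrite author's own statement) =====
-- stated objective: alternative
-- what changed: Replaces the comparison sort (sorted by count, reverse) with a counting/bucket sort: pairs are appended to buckets keyed by their frequency in first-appearance order, then the buckets are concatenated walking frequencies from the maximum down to 1.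
import Mathlib
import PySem

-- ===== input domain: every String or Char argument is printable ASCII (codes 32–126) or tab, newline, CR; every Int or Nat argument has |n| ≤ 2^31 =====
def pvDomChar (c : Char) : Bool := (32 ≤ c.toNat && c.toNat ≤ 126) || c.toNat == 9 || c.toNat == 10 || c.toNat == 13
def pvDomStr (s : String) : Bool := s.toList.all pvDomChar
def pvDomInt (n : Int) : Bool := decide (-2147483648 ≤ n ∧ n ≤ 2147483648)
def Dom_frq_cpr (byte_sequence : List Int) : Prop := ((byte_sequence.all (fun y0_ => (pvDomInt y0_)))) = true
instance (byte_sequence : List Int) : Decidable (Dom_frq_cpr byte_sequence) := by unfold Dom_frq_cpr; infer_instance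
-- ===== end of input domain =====

-- B replaces A's comparison sort by a counting/bucket sort keyed on the frequency; same return value, similar cost.

-- ===== PORT A =====
def frq_cpr (byte_sequence : List Int) : List (Int × Int) :=
  -- count = {}; for byte in byte_sequence: if byte in count: count[byte] += 1 else: count[byte] = 1
  let count : PySem.Dict Int Int :=
    byte_sequence.foldl
      (fun d byte => if d.contains byte then d.modify byte 0 (· + 1) else d.insert byte 1)
      PySem.Dict.empty
  -- sorted(count.items(), key=lambda x: x[1], reverse=True)
  PySem.List.sorted count.items (fun x => x.2) true

-- ===== PORT B =====
def frq_cpr_alt (byte_sequence : List Int) : List (Int × Int) :=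
  -- count[byte] = count.get(byte, 0) + 1
  let count : PySem.Dict Int Int :=
    byte_sequence.foldl (fun d byte => d.insert byte (d.getD byte 0 + 1)) PySem.Dict.empty
  -- buckets: for pair in count.items(): append pair to buckets[pair[1]] (created if absent)
  let buckets : PySem.Dict Int (List (Int × Int)) :=
    count.items.foldl (fun d pair => d.modify pair.2 [] (fun l => l ++ [pair])) PySem.Dict.empty
  -- if buckets: for c in range(max(buckets), 0, -1): if c in buckets: result += buckets[c]
  match PySem.List.max? buckets.keys (fun c => c) with
  | none => []
  | some m =>
      (PySem.List.pyRange m 0 (-1)).foldl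
        (fun acc c => if buckets.contains c then acc ++ buckets.getD c [] else acc) []

-- ===== PRECONDITION & SPEC =====
def Spec_frq_cpr (byte_sequence : List Int) (out : List (Int × Int)) : Prop := out = frq_cpr_alt byte_sequence
instance (byte_sequence : List Int) (out : List (Int × Int)) : Decidable (Spec_frq_cpr byte_sequence out) := by unfold Spec_frq_cpr; infer_instance

-- ===== CLAIM (what is proved, stated in full; the proofs are below) =====
def Claim_equal_frq_cpr : Prop := ∀ (byte_sequence : List Int), Dom_frq_cpr byte_sequence → Spec_frq_cpr byte_sequence (frq_cpr byte_sequence)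

-- ===== LEMMAS AND PROOFS =====

-- inserting before every element puts x in front
theorem insertBy_forall_before {α : Type} (before : α → α → Bool) (x : α) (l : List α)
    (h : ∀ y ∈ l, before x y = true) :
    PySem.List.insertBy before x l = x :: l := by
  cases l with
  | nil => rfl
  | cons y ys => simp [PySem.List.insertBy, h y (by simp)]

-- insertBy passes over a prefix it does not go before
theorem insertBy_append_not_before {α : Type} (before : α → α → Bool) (x : α) (l₁ l₂ : List α)
    (h : ∀ y ∈ l₁, before x y = false) :
    PySem.List.insertBy before x (l₁ ++ l₂) = l₁ ++ PySem.List.insertBy before x l₂ := by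
  induction l₁ with
  | nil => rfl
  | cons a t ih =>
      simp only [List.cons_append, PySem.List.insertBy, h a (by simp)]
      simp only [Bool.false_eq_true, if_false, List.cons.injEq, true_and]
      exact ih (fun y hy => h y (by simp [hy]))

theorem flatMap_congr {α β : Type} (l : List α) (f g : α → List β)
    (h : ∀ x ∈ l, f x = g x) : l.flatMap f = l.flatMap g := by
  induction l with
  | nil => rfl
  | cons a t ih => simp [List.flatMap_cons, h a (by simp), ih (fun x hx => h x (by simp [hx]))]

-- inserting x into a bucket decomposition appends it to its own bucket
theorem insert_bucket {α : Type} (key : α → Int) (x : α) :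
    ∀ (cs : List Int), cs.Pairwise (fun a b => b < a) → key x ∈ cs → ∀ (xs : List α),
    PySem.List.insertBy (fun a b => decide (key b < key a)) x
        (cs.flatMap (fun c => xs.filter (fun y => key y == c)))
      = cs.flatMap (fun c => (xs ++ [x]).filter (fun y => key y == c)) := by
  intro cs
  induction cs with
  | nil => intro _ hx; simp at hx
  | cons c cs' ih =>
      intro hpw hx xs
      have hlt : ∀ c' ∈ cs', c' < c := by
        intro c' hc'; exact (List.pairwise_cons.mp hpw).1 c' hc'
      have hpw' : cs'.Pairwise (fun a b => b < a) := (List.pairwise_cons.mp hpw).2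
      have hmemR : ∀ y ∈ cs'.flatMap (fun c => xs.filter (fun z => key z == c)), key y ∈ cs' := by
        intro y hy
        simp only [List.mem_flatMap, List.mem_filter] at hy
        obtain ⟨c', hc', _, hk⟩ := hy
        simpa [beq_iff_eq.mp hk] using hc'
      by_cases hc : key x = c
      · -- x belongs to this bucket
        have h1 : ∀ y ∈ xs.filter (fun z => key z == c),
            (fun a b => decide (key b < key a)) x y = false := by
          intro y hy
          have := (List.mem_filter.mp hy).2
          simp [beq_iff_eq.mp this, hc]
        have h2 : ∀ y ∈ cs'.flatMap (fun c => xs.filter (fun z => key z == c)),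
            (fun a b => decide (key b < key a)) x y = true := by
          intro y hy
          have := hlt _ (hmemR y hy)
          simp only [decide_eq_true_eq]
          omega
        rw [List.flatMap_cons, insertBy_append_not_before _ _ _ _ h1,
            insertBy_forall_before _ _ _ h2, List.flatMap_cons]
        have hb : (xs ++ [x]).filter (fun y => key y == c)
            = xs.filter (fun y => key y == c) ++ [x] := by
          simp [List.filter_append, hc]
        have hrest : cs'.flatMap (fun c => (xs ++ [x]).filter (fun y => key y == c))
            = cs'.flatMap (fun c => xs.filter (fun y => key y == c)) := by
          apply flatMap_congr
          intro c' hc'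
          have : key x ≠ c' := by have := hlt c' hc'; omega
          simp [List.filter_append, this]
        rw [hb, hrest]
        simp
      · -- x belongs to a later bucket
        have hx' : key x ∈ cs' := by
          rcases List.mem_cons.mp hx with h | h
          · exact absurd h hc
          · exact h
        have hxlt : key x < c := hlt _ hx'
        have h1 : ∀ y ∈ xs.filter (fun z => key z == c),
            (fun a b => decide (key b < key a)) x y = false := by
          intro y hy
          have := (List.mem_filter.mp hy).2
          simp only [decide_eq_false_iff_not, not_lt, beq_iff_eq.mp this]
          omega
        rw [List.flatMap_cons, insertBy_append_not_before _ _ _ _ h1, ih hpw' hx' xs,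
            List.flatMap_cons]
        have hb : (xs ++ [x]).filter (fun y => key y == c)
            = xs.filter (fun y => key y == c) := by
          simp [List.filter_append, hc]
        rw [hb]

-- the stable reverse sort equals bucket concatenation along any strictly decreasing
-- list of keys covering all key values
theorem sorted_rev_buckets {α : Type} (key : α → Int) (xs : List α) (cs : List Int)
    (hpw : cs.Pairwise (fun a b => b < a)) (hmem : ∀ x ∈ xs, key x ∈ cs) :
    PySem.List.sorted xs key true = cs.flatMap (fun c => xs.filter (fun x => key x == c)) := by
  induction xs using List.reverseRecOn with
  | nil => symm; simp [List.flatMap_eq_nil_iff, PySem.List.sorted]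
  | append_singleton t x ih =>
      rw [PySem.List.sorted_rev_eq_foldl_insertBy, List.foldl_append, List.foldl_cons,
          List.foldl_nil, ← PySem.List.sorted_rev_eq_foldl_insertBy,
          ih (fun y hy => hmem y (by simp [hy]))]
      exact insert_bucket key x cs hpw (hmem x (by simp)) t

-- membership in range(m, 0, -1)
theorem mem_pyRange_neg (m c : Int) :
    c ∈ PySem.List.pyRange m 0 (-1) ↔ 0 < c ∧ c ≤ m := by
  rw [PySem.List.pyRange_neg_one]
  simp only [List.mem_map, List.mem_range]
  constructor
  · rintro ⟨k, hk, rfl⟩; omega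
  · rintro ⟨h1, h2⟩
    exact ⟨(m - c).toNat, by omega, by omega⟩

-- range(m, 0, -1) is strictly decreasing
theorem pairwise_pyRange_neg (m : Int) :
    (PySem.List.pyRange m 0 (-1)).Pairwise (fun a b => b < a) := by
  rw [PySem.List.pyRange_neg_one]
  refine List.Pairwise.map _ ?_ (List.pairwise_lt_range)
  intro a b hab
  omega

-- a modify with an absent key is an insert of f applied to the default
theorem modify_absent {κ ν : Type} [BEq κ] [LawfulBEq κ] (d : PySem.Dict κ ν) (k : κ)
    (d0 : ν) (f : ν → ν) (h : d.contains k = false) :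
    d.modify k d0 f = d.insert k (f d0) := by
  simp [PySem.Dict.modify, PySem.Dict.getD_of_not_contains d d0 h]

-- A's counting loop is Counter
theorem countA_eq_counter (bs : List Int) :
    bs.foldl (fun d byte => if d.contains byte then d.modify byte 0 (· + 1) else d.insert byte 1)
      PySem.Dict.empty = PySem.Dict.counter bs := by
  rw [PySem.Dict.counter_eq_foldl]
  congr 1
  funext d b
  by_cases h : d.contains b
  · simp [h]
  · simp only [Bool.not_eq_true] at h
    simp [h, modify_absent d b 0 (· + 1) h]

-- B's bucket dictionary (proof-only abbreviation of the fold in frq_cpr_alt)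
def bkt (I : List (Int × Int)) : PySem.Dict Int (List (Int × Int)) :=
  I.foldl (fun d pair => d.modify pair.2 [] (fun l => l ++ [pair])) PySem.Dict.empty

-- getD of B's bucket-building loop
theorem getD_bucket_fold (l : List (Int × Int)) :
    ∀ (d : PySem.Dict Int (List (Int × Int))) (c : Int),
    (l.foldl (fun d pair => d.modify pair.2 [] (fun l => l ++ [pair])) d).getD c []
      = d.getD c [] ++ l.filter (fun p => p.2 == c) := by
  induction l with
  | nil => intro d c; simp
  | cons p t ih =>
      intro d c
      rw [List.foldl_cons, ih]
      rw [PySem.Dict.getD_modify]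
      by_cases hc : c = p.2
      · simp [hc]
      · have : ¬ (p.2 == c) = true := by simp [beq_iff_eq]; omega
        simp [hc, this]

theorem getD_bkt (I : List (Int × Int)) (c : Int) :
    (bkt I).getD c [] = I.filter (fun p => p.2 == c) := by
  rw [bkt, getD_bucket_fold]
  simp

theorem keys_bkt (I : List (Int × Int)) :
    (bkt I).keys = PySem.Set.ofList (I.map (fun p => p.2)) := by
  rw [bkt, PySem.Dict.keys_foldl_modify_key I (fun p => p.2) [] (fun _ pair l => l ++ [pair])]
  rw [show (PySem.Dict.empty : PySem.Dict Int (List (Int × Int))).keys = [] from rfl]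
  exact PySem.Set.update_nil_left _

-- the core equality, for any items list with positive counts
theorem main_aux (I : List (Int × Int)) (hpos : ∀ p ∈ I, 1 ≤ p.2) :
    PySem.List.sorted I (fun x => x.2) true =
      (match PySem.List.max? (bkt I).keys (fun c => c) with
       | none => []
       | some m =>
           (PySem.List.pyRange m 0 (-1)).foldl
             (fun acc c => if (bkt I).contains c then acc ++ (bkt I).getD c [] else acc) []) := by
  cases hmax : PySem.List.max? (bkt I).keys (fun c => c) with
  | none =>
      have hk0 : (bkt I).keys = [] := (PySem.List.max?_eq_none_iff _ _).mp hmax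
      rw [keys_bkt] at hk0
      have hI0 : I = [] := by
        cases hI' : I with
        | nil => rfl
        | cons p t =>
            exfalso
            have : p.2 ∈ PySem.Set.ofList (I.map (fun p => p.2)) := by
              rw [PySem.Set.mem_ofList]
              simp [hI']
            rw [hk0] at this
            simp at this
      rw [hI0]
      rfl
  | some m =>
      have hle : ∀ p ∈ I, p.2 ≤ m := by
        intro p hp
        have hmem : p.2 ∈ (bkt I).keys := by
          rw [keys_bkt, PySem.Set.mem_ofList]
          exact List.mem_map.mpr ⟨p, hp, rfl⟩
        exact PySem.List.max?_isMax hmax p.2 hmem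
      have hcov : ∀ p ∈ I, p.2 ∈ PySem.List.pyRange m 0 (-1) := by
        intro p hp
        rw [mem_pyRange_neg]
        exact ⟨by have := hpos p hp; omega, hle p hp⟩
      have hfun : (fun (acc : List (Int × Int)) c =>
            if (bkt I).contains c then acc ++ (bkt I).getD c [] else acc)
          = (fun acc c => acc ++ (bkt I).getD c []) := by
        funext acc c
        by_cases h : (bkt I).contains c
        · simp [h]
        · simp only [Bool.not_eq_true] at h
          simp [h, PySem.Dict.getD_of_not_contains (bkt I) [] h]
      rw [hfun]
      show PySem.List.sorted I (fun x => x.2) true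
        = (PySem.List.pyRange m 0 (-1)).foldl (fun acc c => acc ++ (bkt I).getD c []) []
      rw [PySem.List.foldl_append_eq_flatMap, List.nil_append]
      have hflat : (PySem.List.pyRange m 0 (-1)).flatMap (fun c => (bkt I).getD c [])
          = (PySem.List.pyRange m 0 (-1)).flatMap (fun c => I.filter (fun p => p.2 == c)) := by
        apply flatMap_congr
        intro c _
        exact getD_bkt I c
      rw [hflat]
      exact sorted_rev_buckets (fun p => p.2) I (PySem.List.pyRange m 0 (-1))
        (pairwise_pyRange_neg m) hcov

theorem frq_cpr_eq (bs : List Int) : frq_cpr bs = frq_cpr_alt bs := by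
  unfold frq_cpr frq_cpr_alt
  rw [countA_eq_counter, PySem.Dict.foldl_insert_getD_add_one_eq_counter]
  have hpos : ∀ p ∈ (PySem.Dict.counter bs).items, 1 ≤ p.2 := by
    intro p hp
    rw [PySem.Dict.items_counter] at hp
    simp only [List.mem_map] at hp
    obtain ⟨k, hk, rfl⟩ := hp
    have hk' : k ∈ bs := (PySem.Set.mem_ofList _ _).mp hk
    have := List.count_pos_iff.mpr hk'
    simp only []
    omega
  exact main_aux (PySem.Dict.counter bs).items hpos

-- ===== VERDICT (by name: the statement is the Claim_ definition above) =====
theorem frq_cpr_spec : Claim_equal_frq_cpr := by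
  intro bs _
  unfold Spec_frq_cpr
  exact frq_cpr_eq bs
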